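-- pv_equiv track=rewrite | github.com/kv3n/foobar | pelletmanagement.py | halve
-- ===== SOURCE A (Python) =====
-- def halve(a):
--     # a / 2, can be rewritten as (a * 5) / 10.
--     # If number is not divisible by 2 we will get floor(a / 2)
--     result = list(a)
--     num_digits = len(a)
--
--     carry_on = 0
--
--     # Operation to perform a * 5
--     for digit_position in reversed(range(0, num_digits)):
--         digit = int(a[digit_position])
--         result_digit = carry_on + digit * 5
--
--         # Store the carry on for next digit
--         carry_on = int(result_digit / 10)
--         result_digit = result_digit % 10
--
--         result[digit_position] = str(result_digit)
--
--     # Append our final carry on to the result. This will be trimmed out anyway if needed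
--     result.insert(0, str(carry_on))
--
--     # Remove the zero from the end to perform the / 10 operation.
--     result.pop()
--
--     return ''.join(result).lstrip('0')
-- ===== SOURCE B (Python) =====
-- def halve(a):
--     rem = 0
--     out = []
--     for ch in a:
--         cur = rem * 10 + int(ch)
--         out.append(str(cur // 2))
--         rem = cur % 2
--     return ''.join(out).lstrip('0')
-- ===== Notes on version B (the rewrite author's own statement) =====
-- stated objective: simpler
-- what changed: Replaces the right-to-left multiply-by-5-with-carry pass plus insert/pop digit shift by a direct left-to-right long division by 2 with a running remainder.
import Mathlib
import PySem

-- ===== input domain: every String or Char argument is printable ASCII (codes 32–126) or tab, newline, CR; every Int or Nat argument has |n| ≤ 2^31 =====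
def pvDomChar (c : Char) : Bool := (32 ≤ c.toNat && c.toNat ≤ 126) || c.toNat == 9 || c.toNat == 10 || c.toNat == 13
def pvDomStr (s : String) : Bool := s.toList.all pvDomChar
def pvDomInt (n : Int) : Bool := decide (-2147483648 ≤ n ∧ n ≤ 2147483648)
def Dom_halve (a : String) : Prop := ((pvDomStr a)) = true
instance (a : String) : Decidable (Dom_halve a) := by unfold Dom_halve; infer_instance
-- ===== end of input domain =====

-- B replaces A's right-to-left ×5-with-carry pass (plus insert/pop shift) by a direct
-- left-to-right long division by 2 with a running remainder: simpler, same O(n) cost.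

-- int(c) for a single digit character c ('0'..'9'); Pre_halve excludes all other characters
-- (on which Python's int raises ValueError).
def pvDigitVal (c : Char) : Int := (c.toNat : Int) - 48

-- s.lstrip('0'): drop leading '0' characters (exact for any string).
def pvLstrip0 (s : String) : String := String.ofList (s.toList.dropWhile (· == '0'))

-- ===== PORT A =====
-- the reversed(range(..)) loop over digit positions, as structural recursion from the right:
-- returns (transformed digit strings, final carry_on).  int(result_digit / 10) is exact as
-- floor division here since 0 ≤ result_digit ≤ 49.
def halveRec (ds : List Char) : List String × Int :=
  match ds with
  | [] => ([], 0)
  | c :: rest =>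
    let p := halveRec rest
    let rd := p.2 + pvDigitVal c * 5
    (PySem.Int.toStr (PySem.Int.mod rd 10) :: p.1, PySem.Int.floordiv rd 10)

def halve (a : String) : String :=
  let p := halveRec a.toList
  -- result.insert(0, str(carry_on)); result.pop(); ''.join(result).lstrip('0')
  pvLstrip0 (PySem.Str.join "" ((PySem.Int.toStr p.2 :: p.1).dropLast))

-- ===== PORT B =====
-- left-to-right long division by 2 with running remainder rem.
def halveAltRec (ds : List Char) (rem : Int) : List String :=
  match ds with
  | [] => []
  | c :: rest =>
    let cur := rem * 10 + pvDigitVal c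
    PySem.Int.toStr (PySem.Int.floordiv cur 2) :: halveAltRec rest (PySem.Int.mod cur 2)

def halve_alt (a : String) : String :=
  pvLstrip0 (PySem.Str.join "" (halveAltRec a.toList 0))

-- ===== PRECONDITION & SPEC =====
-- Pre_ excludes exactly the strings containing a non-digit character, on which A's
-- int(a[i]) raises ValueError (the empty string is admitted: A returns '' there).
def Pre_halve (a : String) : Prop := a.toList.all Char.isDigit = true
instance (a : String) : Decidable (Pre_halve a) := by unfold Pre_halve; infer_instance
def pvWitness_halve : String := "1234"
def Spec_halve (a : String) (out : String) : Prop := out = halve_alt a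
instance (a : String) (out : String) : Decidable (Spec_halve a out) := by unfold Spec_halve; infer_instance

-- ===== CLAIM (what is proved, stated in full; the proofs are below) =====
def Claim_equal_halve : Prop := ∀ (a : String), Dom_halve a → Pre_halve a → Spec_halve a (halve a)

-- ===== LEMMAS AND PROOFS =====

theorem pvDigitVal_bounds {c : Char} (h : c.isDigit = true) :
    0 ≤ pvDigitVal c ∧ pvDigitVal c ≤ 9 := by
  simp [Char.isDigit, UInt32.le_iff_toNat_le] at h
  unfold pvDigitVal
  omega

theorem halveRec_carry_bounds {ds : List Char} (h : ds.all Char.isDigit = true) :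
    0 ≤ (halveRec ds).2 ∧ (halveRec ds).2 ≤ 4 := by
  induction ds with
  | nil => simp [halveRec]
  | cons c rest ih =>
    simp only [List.all_cons, Bool.and_eq_true] at h
    obtain ⟨hc, hrest⟩ := h
    have hd := pvDigitVal_bounds hc
    have hcar := ih hrest
    simp only [halveRec]
    rw [PySem.Int.floordiv_eq_ediv_of_pos (by omega)]
    omega

theorem halveAltRec_eq {ds : List Char} (h : ds.all Char.isDigit = true)
    {r : Int} (hr0 : 0 ≤ r) (hr1 : r ≤ 1) :
    halveAltRec ds r =
      (PySem.Int.toStr (5 * r + (halveRec ds).2) :: (halveRec ds).1).dropLast := by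
  induction ds generalizing r with
  | nil => simp [halveAltRec, halveRec]
  | cons c rest ih =>
    simp only [List.all_cons, Bool.and_eq_true] at h
    obtain ⟨hc, hrest⟩ := h
    have hd := pvDigitVal_bounds hc
    have hcar := halveRec_carry_bounds hrest
    simp only [halveAltRec, halveRec, List.dropLast_cons₂]
    rw [List.cons_eq_cons]
    refine ⟨?_, ?_⟩
    · -- head digit: (10r + d) // 2 = 5r + ((carry + 5d) // 10)
      congr 1
      rw [PySem.Int.floordiv_eq_ediv_of_pos (by omega),
          PySem.Int.floordiv_eq_ediv_of_pos (by omega)]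
      omega
    · rw [ih hrest (by rw [PySem.Int.mod_eq_emod_of_pos (by omega)]; omega)
             (by rw [PySem.Int.mod_eq_emod_of_pos (by omega)]; omega)]
      congr 2
      rw [PySem.Int.mod_eq_emod_of_pos (by omega),
          PySem.Int.mod_eq_emod_of_pos (by omega)]
      congr 1
      omega

-- ===== VERDICT (by name: the statement is the Claim_ definition above) =====
theorem halve_spec : Claim_equal_halve := by
  intro a _ hpre
  unfold Spec_halve halve halve_alt
  rw [halveAltRec_eq hpre (le_refl 0) (by norm_num)]
  norm_num
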